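-- pv_equiv track=rewrite | github.com/igluko/pve-scripts | gen-sanoid-conf.py | CheckSanoidConf
-- ===== SOURCE A (Python) =====
-- def CheckSanoidConf(OldConf, Datasets):
--     OkStatus = True
--     ZfsDatasets = Datasets.copy()
--     for line in OldConf:
--         if 'templates below this line' in line:
--             break
--         if ('[' in line):
--             if (line[1:-1] in ZfsDatasets):
--                 ZfsDatasets.remove(line[1:-1])
--             else:
--                  OkStatus = False
--     if len(ZfsDatasets) != 0:
--         OkStatus = False
--     return(OkStatus)
-- ===== SOURCE B (Python) =====
-- def CheckSanoidConf(OldConf, Datasets):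
--     entries = []
--     for line in OldConf:
--         if 'templates below this line' in line:
--             break
--         if '[' in line:
--             entries.append(line[1:-1])
--     return sorted(entries) == sorted(Datasets)
-- ===== Notes on version B (the rewrite author's own statement) =====
-- stated objective: simpler
-- what changed: Replaces the incremental remove-from-a-copy loop with its flag and final emptiness check by collecting the bracket entries in one pass and comparing sorted(entries) == sorted(Datasets), i.e. stating the multiset equality directly.
import Mathlib
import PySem

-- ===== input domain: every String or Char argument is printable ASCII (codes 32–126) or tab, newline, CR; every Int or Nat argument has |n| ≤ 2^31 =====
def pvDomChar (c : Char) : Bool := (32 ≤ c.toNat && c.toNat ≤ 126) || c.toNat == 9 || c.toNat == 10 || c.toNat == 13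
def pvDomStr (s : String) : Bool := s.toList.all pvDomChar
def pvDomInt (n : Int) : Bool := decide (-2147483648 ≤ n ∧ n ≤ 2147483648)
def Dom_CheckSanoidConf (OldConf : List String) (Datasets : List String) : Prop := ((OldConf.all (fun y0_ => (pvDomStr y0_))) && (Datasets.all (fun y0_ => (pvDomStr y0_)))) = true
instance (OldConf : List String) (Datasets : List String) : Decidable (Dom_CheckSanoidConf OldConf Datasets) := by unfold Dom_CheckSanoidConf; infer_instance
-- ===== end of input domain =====

-- B replaces A's remove-from-a-copy loop (flag + final emptiness check) by one pass
-- collecting the bracket entries followed by sorted(entries) == sorted(Datasets): simpler.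

-- ===== PORT A =====
-- A's for-loop with break, carrying the state (OkStatus, ZfsDatasets)
def CheckSanoidConfLoop (lines : List String) (ok : Bool) (zfs : List String) : Bool × List String :=
  match lines with
  | [] => (ok, zfs)
  | line :: rest =>
    if PySem.Str.isIn "templates below this line" line then (ok, zfs)   -- break
    else if PySem.Str.isIn "[" line then
      let e := PySem.Str.slice line (some 1) (some (-1))                -- line[1:-1]
      if e ∈ zfs then
        CheckSanoidConfLoop rest ok ((PySem.List.remove? zfs e).getD zfs)  -- ZfsDatasets.remove(e)
      else CheckSanoidConfLoop rest false zfs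
    else CheckSanoidConfLoop rest ok zfs

def CheckSanoidConf (OldConf : List String) (Datasets : List String) : Bool :=
  let r := CheckSanoidConfLoop OldConf true Datasets
  if r.2.length ≠ 0 then false else r.1

-- ===== PORT B =====
-- B's single pass collecting line[1:-1] for bracket lines before the marker
def altEntries (lines : List String) : List String :=
  match lines with
  | [] => []
  | line :: rest =>
    if PySem.Str.isIn "templates below this line" line then []          -- break
    else if PySem.Str.isIn "[" line then
      PySem.Str.slice line (some 1) (some (-1)) :: altEntries rest
    else altEntries rest

def CheckSanoidConf_alt (OldConf : List String) (Datasets : List String) : Bool :=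
  decide (PySem.List.sorted (altEntries OldConf) (fun x => x) false
        = PySem.List.sorted Datasets (fun x => x) false)

-- ===== PRECONDITION & SPEC =====
def Spec_CheckSanoidConf (OldConf : List String) (Datasets : List String) (out : Bool) : Prop := out = CheckSanoidConf_alt OldConf Datasets
instance (OldConf : List String) (Datasets : List String) (out : Bool) : Decidable (Spec_CheckSanoidConf OldConf Datasets out) := by unfold Spec_CheckSanoidConf; infer_instance

-- ===== CLAIM (what is proved, stated in full; the proofs are below) =====
def Claim_equal_CheckSanoidConf : Prop := ∀ (OldConf : List String) (Datasets : List String), Dom_CheckSanoidConf OldConf Datasets → Spec_CheckSanoidConf OldConf Datasets (CheckSanoidConf OldConf Datasets)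

-- ===== LEMMAS AND PROOFS =====

-- once the flag is false, the loop's final verdict is false
theorem loop_false (lines : List String) (zfs : List String) :
    ((CheckSanoidConfLoop lines false zfs).2.length = 0 && (CheckSanoidConfLoop lines false zfs).1) = false := by
  induction lines generalizing zfs with
  | nil => simp [CheckSanoidConfLoop]
  | cons line rest ih =>
    simp only [CheckSanoidConfLoop]
    split_ifs with h1 h2 h3
    · simp
    · exact ih _
    · exact ih _
    · exact ih _

-- A's loop (started with flag true) accepts exactly when the collected entries
-- are a permutation of the remaining datasets
theorem loop_true_iff_perm (lines : List String) (zfs : List String) :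
    (((CheckSanoidConfLoop lines true zfs).2.length = 0 && (CheckSanoidConfLoop lines true zfs).1) = true)
      ↔ (altEntries lines).Perm zfs := by
  induction lines generalizing zfs with
  | nil =>
    simp [CheckSanoidConfLoop, altEntries, List.length_eq_zero_iff, List.nil_perm]
  | cons line rest ih =>
    simp only [CheckSanoidConfLoop, altEntries]
    split_ifs with h1 h2 h3
    · simp [List.length_eq_zero_iff, List.nil_perm]
    · rw [PySem.List.remove?_eq_some_erase _ _ h3]
      simp only [Option.getD_some]
      exact (ih _).trans
        ⟨fun hp => (List.cons_perm_iff_perm_erase).2 ⟨h3, hp⟩,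
         fun hp => ((List.cons_perm_iff_perm_erase).1 hp).2⟩
    · constructor
      · intro h
        rw [loop_false rest zfs] at h
        cases h
      · intro hp
        exact absurd ((List.cons_perm_iff_perm_erase).1 hp).1 h3
    · exact ih zfs

-- ===== VERDICT (by name: the statement is the Claim_ definition above) =====
theorem CheckSanoidConf_spec : Claim_equal_CheckSanoidConf := by
  intro OldConf Datasets _
  unfold Spec_CheckSanoidConf CheckSanoidConf CheckSanoidConf_alt
  rw [Bool.eq_iff_iff, decide_eq_true_iff, PySem.List.sorted_id_eq_sorted_id_iff_perm,
    ← loop_true_iff_perm OldConf Datasets]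
  by_cases h : (CheckSanoidConfLoop OldConf true Datasets).2.length = 0 <;>
    simp [h]
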